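-- pv_equiv track=rewrite | github.com/rrkas/dsa-practice-2026 | platforms/hacker-rank/40--pylons/solutions/solution.py | pylons
-- ===== SOURCE A (Python) =====
-- def pylons(k, arr):
--     n = len(arr)
--     i = 0
--     plants = 0
--
--     while i < n:
--         pos = min(n - 1, i + k - 1)
--
--         while pos >= i - (k - 1) and pos >= 0 and arr[pos] == 0:
--             pos -= 1
--
--         if pos < i - (k - 1) or pos < 0:
--             return -1
--
--         plants += 1
--
--         i = pos + k
--
--     return plants
-- ===== SOURCE B (Python) =====
-- def _rightmost_le(plants, x):
--     # index of the rightmost element of sorted list `plants` that is <= x, or -1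
--     lo, hi = 0, len(plants)
--     while lo < hi:
--         mid = (lo + hi) // 2
--         if plants[mid] <= x:
--             lo = mid + 1
--         else:
--             hi = mid
--     return lo - 1
--
--
-- def pylons(k, arr):
--     n = len(arr)
--     plants = [j for j, v in enumerate(arr) if v]
--     count = 0
--     cursor = 0
--     while cursor < n:
--         p = _rightmost_le(plants, min(n - 1, cursor + k - 1))
--         if p < 0 or plants[p] < cursor - (k - 1):
--             return -1
--         count += 1
--         cursor = plants[p] + k
--     return count
-- ===== Notes on version B (the rewrite author's own statement) =====
-- stated objective: alternative
-- what changed: Replaced the per-step backward linear scan of arr with a one-time sorted index of plant positions queried by hand-written binary search (rightmost plant <= window top), keeping the same greedy cursor.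
import Mathlib
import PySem

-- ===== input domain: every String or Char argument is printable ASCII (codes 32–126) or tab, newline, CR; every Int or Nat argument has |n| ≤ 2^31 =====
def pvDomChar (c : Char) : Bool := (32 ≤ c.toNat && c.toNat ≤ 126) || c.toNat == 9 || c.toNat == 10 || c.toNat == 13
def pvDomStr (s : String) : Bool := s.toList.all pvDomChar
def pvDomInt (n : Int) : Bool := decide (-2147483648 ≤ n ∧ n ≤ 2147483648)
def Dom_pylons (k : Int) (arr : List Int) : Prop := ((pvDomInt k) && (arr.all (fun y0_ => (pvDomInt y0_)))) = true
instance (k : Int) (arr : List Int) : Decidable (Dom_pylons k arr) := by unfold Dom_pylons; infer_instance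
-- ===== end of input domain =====

-- B replaces A's per-step backward linear scan of arr with a one-time list of plant
-- positions queried by a hand-written binary search (rightmost plant ≤ window top),
-- keeping the same greedy cursor; both are total and agree everywhere.

-- ===== PORT A =====
-- inner `while` of A: step pos down while it is inside the window and arr[pos] == 0
-- (arr[pos] is only read when 0 ≤ pos < len(arr), so the .getD default is unreachable)
def pylonsScan (arr : List Int) (lo pos : Int) : Int :=
  if h : lo ≤ pos ∧ 0 ≤ pos ∧ (PySem.List.pyGet? arr pos).getD 1 = 0 then
    pylonsScan arr lo (pos - 1)
  else pos
termination_by (pos + 1).toNat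
decreasing_by omega

-- outer `while` of A, with the running count `plants` as accumulator
def pylonsLoop (k : Int) (arr : List Int) (i plants : Int) : Int :=
  if _h : i < (arr.length : Int) then
    let pos := pylonsScan arr (i - (k - 1)) (min ((arr.length : Int) - 1) (i + k - 1))
    if _h2 : pos < i - (k - 1) ∨ pos < 0 then -1
    else pylonsLoop k arr (pos + k) (plants + 1)
  else plants
termination_by ((arr.length : Int) - i).toNat
decreasing_by omega

def pylons (k : Int) (arr : List Int) : Int := pylonsLoop k arr 0 0

-- ===== PORT B =====
-- Source B's hand-written binary search `_rightmost_le` (plants[mid] only read with 0 ≤ mid < len)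
def rmLoop (plants : List Int) (x lo hi : Int) : Int :=
  if h : lo < hi then
    let mid := PySem.Int.floordiv (lo + hi) 2
    if (PySem.List.pyGet? plants mid).getD 0 ≤ x then rmLoop plants x (mid + 1) hi
    else rmLoop plants x lo mid
  else lo - 1
termination_by (hi - lo).toNat
decreasing_by
  · have h1 := (PySem.Int.le_floordiv_iff_mul_le (a := lo + hi) (b := 2) (q := lo) (by norm_num)).mpr (by omega)
    omega
  · have h2 := (PySem.Int.floordiv_lt_iff_lt_mul (a := lo + hi) (b := 2) (q := hi) (by norm_num)).mpr (by omega)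
    omega

def rightmostLE (plants : List Int) (x : Int) : Int := rmLoop plants x 0 plants.length

-- `plants = [j for j, v in enumerate(arr) if v]`
def pylonsPlants (arr : List Int) : List Int :=
  (PySem.List.enumerate arr 0).filterMap (fun jv => if jv.2 ≠ 0 then some jv.1 else none)

-- Source B's greedy cursor loop
def pylonsAltLoop (k : Int) (arr : List Int) (plants : List Int) (count cursor : Int) : Int :=
  if _h : cursor < (arr.length : Int) then
    let p := rightmostLE plants (min ((arr.length : Int) - 1) (cursor + k - 1))
    if h2 : p < 0 ∨ (PySem.List.pyGet? plants p).getD 0 < cursor - (k - 1) then -1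
    else pylonsAltLoop k arr plants (count + 1) ((PySem.List.pyGet? plants p).getD 0 + k)
  else count
termination_by ((arr.length : Int) - cursor).toNat
decreasing_by
  have h3 : ¬((rightmostLE plants (min ((arr.length : Int) - 1) (cursor + k - 1))) < 0 ∨
      (PySem.List.pyGet? plants (rightmostLE plants (min ((arr.length : Int) - 1) (cursor + k - 1)))).getD 0
        < cursor - (k - 1)) := h2
  omega

def pylons_alt (k : Int) (arr : List Int) : Int :=
  pylonsAltLoop k arr (pylonsPlants arr) 0 0

-- ===== PRECONDITION & SPEC =====
def Spec_pylons (k : Int) (arr : List Int) (out : Int) : Prop := out = pylons_alt k arr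
instance (k : Int) (arr : List Int) (out : Int) : Decidable (Spec_pylons k arr out) := by unfold Spec_pylons; infer_instance

-- ===== CLAIM (what is proved, stated in full; the proofs are below) =====
def Claim_equal_pylons : Prop := ∀ (k : Int) (arr : List Int), Dom_pylons k arr → Spec_pylons k arr (pylons k arr)

-- ===== LEMMAS AND PROOFS =====

-- reading arr[j] in range yields the canonical value arr.getD j.toNat 0
theorem pyGet_in (arr : List Int) (j : Int) (d : Int) (h0 : 0 ≤ j) (h1 : j < arr.length) :
    (PySem.List.pyGet? arr j).getD d = arr.getD j.toNat 0 := by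
  rw [PySem.List.pyGet?_of_nonneg arr h0, List.getD_eq_getElem?_getD,
    List.getElem?_eq_getElem (by omega)]
  rfl

theorem mem_plants (arr : List Int) (j : Int) :
    j ∈ pylonsPlants arr ↔ 0 ≤ j ∧ j < arr.length ∧ arr.getD j.toNat 0 ≠ 0 := by
  simp only [pylonsPlants, List.mem_filterMap, PySem.List.mem_enumerate_iff]
  constructor
  · rintro ⟨⟨a, b⟩, ⟨m, hm, hp⟩, hf⟩
    obtain ⟨rfl, rfl⟩ := Prod.mk.injEq .. ▸ hp
    simp only at hf
    split at hf
    · rename_i hb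
      simp only [Option.some.injEq] at hf
      subst hf
      refine ⟨by omega, by omega, ?_⟩
      simpa [List.getD_eq_getElem?_getD, List.getElem?_eq_getElem hm] using hb
    · exact absurd hf (by simp)
  · rintro ⟨h0, h1, hne⟩
    have hm : j.toNat < arr.length := by omega
    refine ⟨(j, arr[j.toNat]), ⟨j.toNat, hm, by simp [Int.toNat_of_nonneg h0]⟩, ?_⟩
    have : arr[j.toNat] ≠ 0 := by
      simpa [List.getD_eq_getElem?_getD, List.getElem?_eq_getElem hm] using hne
    simp [this]

theorem plants_sorted (arr : List Int) : (pylonsPlants arr).Pairwise (· < ·) := by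
  rw [pylonsPlants, List.pairwise_filterMap]
  refine (PySem.List.pairwise_lt_enumerate arr 0).imp ?_
  intro a b hab x hx y hy
  split at hx <;> split at hy <;> simp_all

-- strict monotonicity of positions in a strictly sorted list, in getD form
theorem getD_strict (plants : List Int) (hs : plants.Pairwise (· < ·))
    (m1 m2 : Nat) (h12 : m1 < m2) (h2 : m2 < plants.length) :
    plants.getD m1 0 < plants.getD m2 0 := by
  have := List.pairwise_iff_getElem.mp hs m1 m2 (by omega) h2 h12
  simpa [List.getD_eq_getElem?_getD, List.getElem?_eq_getElem (show m1 < plants.length by omega),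
    List.getElem?_eq_getElem h2] using this

-- characterisation of A's inner backward scan
theorem scan_spec (arr : List Int) (lo pos : Int) (hp : pos < arr.length) :
    pylonsScan arr lo pos ≤ pos ∧
    (∀ j : Int, pylonsScan arr lo pos < j → j ≤ pos → 0 ≤ j → arr.getD j.toNat 0 = 0) ∧
    (lo ≤ pylonsScan arr lo pos → 0 ≤ pylonsScan arr lo pos →
      arr.getD (pylonsScan arr lo pos).toNat 0 ≠ 0) := by
  rw [pylonsScan]
  split
  · rename_i h
    obtain ⟨h1, h2, h3⟩ := h
    rw [pyGet_in arr pos 1 h2 hp] at h3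
    obtain ⟨ih1, ih2, ih3⟩ := scan_spec arr lo (pos - 1) (by omega)
    refine ⟨by omega, ?_, ih3⟩
    intro j hj1 hj2 hj3
    by_cases hje : j = pos
    · subst hje; exact h3
    · exact ih2 j hj1 (by omega) hj3
  · rename_i h
    refine ⟨le_refl _, by omega, ?_⟩
    intro hlo h0 hc
    exact h ⟨hlo, h0, by rw [pyGet_in arr pos 1 h0 hp]; exact hc⟩
termination_by (pos + 1).toNat
decreasing_by omega

-- characterisation of B's binary search
theorem rm_spec (plants : List Int) (x lo hi : Int)
    (hs : plants.Pairwise (· < ·))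
    (h0 : 0 ≤ lo) (hhi : hi ≤ plants.length) (hlohi : lo ≤ hi)
    (hlow : ∀ m : Nat, (m : Int) < lo → plants.getD m 0 ≤ x)
    (hhigh : ∀ m : Nat, hi ≤ (m : Int) → m < plants.length → x < plants.getD m 0) :
    lo - 1 ≤ rmLoop plants x lo hi ∧ rmLoop plants x lo hi ≤ hi - 1 ∧
    (∀ m : Nat, (m : Int) ≤ rmLoop plants x lo hi → m < plants.length → plants.getD m 0 ≤ x) ∧
    (∀ m : Nat, rmLoop plants x lo hi < (m : Int) → m < plants.length → x < plants.getD m 0) := by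
  by_cases hlt : lo < hi
  · have hstep : rmLoop plants x lo hi =
        (if (PySem.List.pyGet? plants (PySem.Int.floordiv (lo + hi) 2)).getD 0 ≤ x then
          rmLoop plants x (PySem.Int.floordiv (lo + hi) 2 + 1) hi
         else rmLoop plants x lo (PySem.Int.floordiv (lo + hi) 2)) := by
      rw [rmLoop, dif_pos hlt]
    have hmid1 := (PySem.Int.le_floordiv_iff_mul_le (a := lo + hi) (b := 2) (q := lo) (by norm_num)).mpr (by omega)
    have hmid2 := (PySem.Int.floordiv_lt_iff_lt_mul (a := lo + hi) (b := 2) (q := hi) (by norm_num)).mpr (by omega)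
    set mid := PySem.Int.floordiv (lo + hi) 2 with hmiddef
    have hmidlen : mid < plants.length := by omega
    rw [hstep, pyGet_in plants mid 0 (by omega) hmidlen]
    split
    · rename_i hle
      have hrec := rm_spec plants x (mid + 1) hi hs (by omega) hhi (by omega) ?_ hhigh
      · exact ⟨by omega, hrec.2.1, hrec.2.2.1, hrec.2.2.2⟩
      intro m hm
      by_cases he : (m : Int) = mid.toNat
      · have : m = mid.toNat := by omega
        subst this; exact hle
      · have := getD_strict plants hs m mid.toNat (by omega) (by omega)
        omega
    · rename_i hgt
      have hrec := rm_spec plants x lo mid hs h0 (by omega) (by omega) hlow ?_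
      · exact ⟨hrec.1, by omega, hrec.2.2.1, hrec.2.2.2⟩
      intro m hm hmlen
      by_cases he : (m : Int) = mid.toNat
      · have : m = mid.toNat := by omega
        subst this; omega
      · have := getD_strict plants hs mid.toNat m (by omega) hmlen
        omega
  · have hstep : rmLoop plants x lo hi = lo - 1 := by rw [rmLoop, dif_neg hlt]
    rw [hstep]
    refine ⟨by omega, by omega, ?_, ?_⟩
    · intro m hm _; exact hlow m (by omega)
    · intro m hm hmlen; exact hhigh m (by omega) hmlen
termination_by (hi - lo).toNat
decreasing_by all_goals omega

-- the two greedy loops agree step by step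
theorem loop_eq (k : Int) (arr : List Int) (i c : Int) :
    pylonsLoop k arr i c = pylonsAltLoop k arr (pylonsPlants arr) c i := by
  by_cases hi : i < (arr.length : Int)
  · have hstepA : pylonsLoop k arr i c =
        (if _h2 : pylonsScan arr (i - (k - 1)) (min ((arr.length : Int) - 1) (i + k - 1)) < i - (k - 1) ∨
            pylonsScan arr (i - (k - 1)) (min ((arr.length : Int) - 1) (i + k - 1)) < 0 then -1
         else pylonsLoop k arr
            (pylonsScan arr (i - (k - 1)) (min ((arr.length : Int) - 1) (i + k - 1)) + k) (c + 1)) := by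
      rw [pylonsLoop, dif_pos hi]
    have hstepB : pylonsAltLoop k arr (pylonsPlants arr) c i =
        (if _h2 : rightmostLE (pylonsPlants arr) (min ((arr.length : Int) - 1) (i + k - 1)) < 0 ∨
            (PySem.List.pyGet? (pylonsPlants arr)
              (rightmostLE (pylonsPlants arr) (min ((arr.length : Int) - 1) (i + k - 1)))).getD 0
              < i - (k - 1) then -1
         else pylonsAltLoop k arr (pylonsPlants arr) (c + 1)
            ((PySem.List.pyGet? (pylonsPlants arr)
              (rightmostLE (pylonsPlants arr) (min ((arr.length : Int) - 1) (i + k - 1)))).getD 0 + k)) := by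
      rw [pylonsAltLoop, dif_pos hi]
    rw [hstepA, hstepB]
    set n : Int := (arr.length : Int) with hn
    set ub : Int := min (n - 1) (i + k - 1) with hub
    set lo : Int := i - (k - 1) with hlo
    set plants : List Int := pylonsPlants arr with hplants
    set pos : Int := pylonsScan arr lo ub with hpos
    set p : Int := rightmostLE plants ub with hp
    have hsorted : plants.Pairwise (· < ·) := plants_sorted arr
    obtain ⟨s1, s2, s3⟩ := scan_spec arr lo ub (by omega)
    rw [← hpos] at s1 s2 s3
    obtain ⟨r1, r2, r3, r4⟩ := rm_spec plants ub 0 plants.length hsorted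
      (by omega) (by omega) (by simp) (by intro m hm; omega) (by intro m hm hml; omega)
    have hrLE : rmLoop plants ub 0 (plants.length : Int) = p := rfl
    rw [hrLE] at r1 r2 r3 r4
    have hmemD : ∀ m : Nat, m < plants.length → plants.getD m 0 ∈ plants := by
      intro m hm
      rw [List.getD_eq_getElem?_getD, List.getElem?_eq_getElem hm]
      exact List.getElem_mem hm
    by_cases hA : pos < lo ∨ pos < 0
    · -- A fails: the window [max(lo,0), ub] contains no plant, so B fails too
      rw [dif_pos hA]
      have hB : p < 0 ∨ (PySem.List.pyGet? plants p).getD 0 < lo := by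
        by_contra hB
        push Not at hB
        obtain ⟨hp0, hpv⟩ := hB
        rw [pyGet_in plants p 0 hp0 (by omega)] at hpv
        have hpm : p.toNat < plants.length := by omega
        set pv := plants.getD p.toNat 0 with hpv0
        obtain ⟨hv0, hv1, hv2⟩ := (mem_plants arr pv).mp (hmemD p.toNat hpm)
        have hvle : pv ≤ ub := r3 p.toNat (by omega) hpm
        exact hv2 (s2 pv (by omega) hvle hv0)
      rw [dif_pos hB]
    · -- A succeeds at pos; B's search finds exactly pos
      rw [dif_neg hA]
      push Not at hA
      obtain ⟨hA1, hA2⟩ := hA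
      have hposmem : pos ∈ plants := (mem_plants arr pos).mpr ⟨hA2, by omega, s3 hA1 hA2⟩
      obtain ⟨m, hm, hme⟩ := List.mem_iff_getElem.mp hposmem
      have hmd : plants.getD m 0 = pos := by
        rw [List.getD_eq_getElem?_getD, List.getElem?_eq_getElem hm, hme]
        rfl
      have hmle : (m : Int) ≤ p := by
        by_contra hc
        push Not at hc
        have := r4 m hc hm
        omega
      have hp0 : 0 ≤ p := by omega
      have hplen : p.toNat < plants.length := by omega
      have hpveq : (PySem.List.pyGet? plants p).getD 0 = pos := by
        rw [pyGet_in plants p 0 hp0 (by omega)]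
        set pv := plants.getD p.toNat 0 with hpv0
        obtain ⟨hv0, hv1, hv2⟩ := (mem_plants arr pv).mp (hmemD p.toNat hplen)
        have hvle : pv ≤ ub := r3 p.toNat (by omega) hplen
        have hple : pos ≤ pv := by
          by_cases hmp : m = p.toNat
          · subst hmp; omega
          · have := getD_strict plants hsorted m p.toNat (by omega) hplen
            omega
        rcases eq_or_lt_of_le hple with h | h
        · omega
        · exact absurd (s2 pv h hvle hv0) hv2
      have hB : ¬ (p < 0 ∨ (PySem.List.pyGet? plants p).getD 0 < lo) := by
        rw [hpveq]; omega
      rw [dif_neg hB, hpveq]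
      have hterm1 : i - (k - 1) ≤
          pylonsScan arr (i - (k - 1)) (min ((arr.length : Int) - 1) (i + k - 1)) := hA1
      have hterm2 : i < (arr.length : Int) := hi
      exact loop_eq k arr (pos + k) (c + 1)
  · have hstepA : pylonsLoop k arr i c = c := by rw [pylonsLoop, dif_neg hi]
    have hstepB : pylonsAltLoop k arr (pylonsPlants arr) c i = c := by
      rw [pylonsAltLoop, dif_neg hi]
    rw [hstepA, hstepB]
termination_by ((arr.length : Int) - i).toNat
decreasing_by omega

-- ===== VERDICT (by name: the statement is the Claim_ definition above) =====
theorem pylons_spec : Claim_equal_pylons := by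
  intro k arr _
  unfold Spec_pylons pylons pylons_alt
  exact loop_eq k arr 0 0
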